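-- pv_equiv track=rewrite | github.com/antonyjozic/Peptide-Analyzer | modules/analysis.py | count_residues
-- ===== SOURCE A (Python) =====
-- AA = {'A':0,'R':1,'N':2,'D':3,'C':4,'E':5,'Q':6,'G':7,'H':8,'I':9,'L':10,'K':11,'M':12,'F':13,'P':14,'S':15,'T':16,'W':17,'Y':18,'V':19}
--
-- def count_residues(seq: str, final_list: list) -> list:
--     '''
--     Counts the residues at each position in each sequence, and iterates the respective i,j value in the count matrix.
--     '''
--     counter = 0
--     for x in seq:
--         c2 = 0
--         for y in seq[counter]:
--             if y in AA:
--                 final_list[AA[y]][c2] += 1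
--             c2 += 1
--         counter += 1
--     return final_list
-- ===== SOURCE B (Python) =====
-- AA = {'A':0,'R':1,'N':2,'D':3,'C':4,'E':5,'Q':6,'G':7,'H':8,'I':9,'L':10,'K':11,'M':12,'F':13,'P':14,'S':15,'T':16,'W':17,'Y':18,'V':19}
--
-- def count_residues(seq: str, final_list: list) -> list:
--     '''
--     Counts the residues at each position in each sequence, and iterates the respective i,j value in the count matrix.
--     Column-major: walks position by position across all sequences (same mutation of final_list in place).
--     '''
--     width = 0
--     for s in seq:
--         if len(s) > width:
--             width = len(s)
--     for c2 in range(width):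
--         for s in seq:
--             if c2 < len(s):
--                 y = s[c2]
--                 if y in AA:
--                     final_list[AA[y]][c2] += 1
--     return final_list
-- ===== Notes on version B (the rewrite author's own statement) =====
-- stated objective: alternative
-- what changed: B transposes the loop nest: it walks column-major (positions outer, sequences inner) over a precomputed maximum width, instead of A's row-major walk with its redundant counter/seq[counter] re-indexing; increments commute so the resulting matrix is identical.
import Mathlib
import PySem

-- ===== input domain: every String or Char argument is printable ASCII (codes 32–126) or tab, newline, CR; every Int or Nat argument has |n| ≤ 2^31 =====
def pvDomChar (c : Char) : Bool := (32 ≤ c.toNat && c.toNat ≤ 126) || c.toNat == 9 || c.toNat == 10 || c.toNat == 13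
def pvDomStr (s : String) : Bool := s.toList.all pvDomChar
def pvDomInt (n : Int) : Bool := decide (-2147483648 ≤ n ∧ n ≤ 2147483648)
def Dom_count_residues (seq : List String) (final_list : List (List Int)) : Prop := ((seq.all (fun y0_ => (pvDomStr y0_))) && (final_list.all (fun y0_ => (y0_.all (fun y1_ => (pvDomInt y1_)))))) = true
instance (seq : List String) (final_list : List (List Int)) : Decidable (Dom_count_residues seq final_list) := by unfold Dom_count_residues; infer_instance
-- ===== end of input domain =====

-- B transposes A's loop nest (column-major instead of row-major); both Pythons mutate final_list
-- in place and return it — the equivalence proved here is about the return value.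

-- ===== PORT A =====
-- the module constant AA
def pyAA : PySem.Dict Char Nat := PySem.Dict.ofList
  [('A',0),('R',1),('N',2),('D',3),('C',4),('E',5),('Q',6),('G',7),('H',8),('I',9),
   ('L',10),('K',11),('M',12),('F',13),('P',14),('S',15),('T',16),('W',17),('Y',18),('V',19)]

-- 'if y in AA: final_list[AA[y]][c2] += 1' — shared by both Pythons verbatim.
-- List.modify is exact where the indices are in range (Pre_); Python raises IndexError otherwise.
def incAA (m : List (List Int)) (c2 : Nat) (y : Char) : List (List Int) :=
  match pyAA.get? y with
  | some r => m.modify r (fun row => row.modify c2 (· + 1))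
  | none => m

-- A: row-major; state carries counter / c2 exactly as the Python does; seq[counter] via getD
-- (exact: counter < seq.length throughout the loop).
def count_residues (seq : List String) (final_list : List (List Int)) : List (List Int) :=
  (seq.foldl
    (fun (st : List (List Int) × Nat) _x =>
      (((seq.getD st.2 "").toList.foldl
          (fun (p : List (List Int) × Nat) y => (incAA p.1 p.2 y, p.2 + 1))
          (st.1, 0)).1,
       st.2 + 1))
    (final_list, 0)).1

-- ===== PORT B =====
def count_residues_alt (seq : List String) (final_list : List (List Int)) : List (List Int) :=
  let width := seq.foldl (fun w s => if s.toList.length > w then s.toList.length else w) 0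
  (List.range width).foldl
    (fun m c2 =>
      seq.foldl
        (fun m s =>
          match s.toList[c2]? with
          | some y => incAA m c2 y
          | none => m)
        m)
    final_list

-- ===== PRECONDITION & SPEC =====
-- Pre_ excludes exactly the inputs on which the Python raises IndexError: some residue of some
-- sequence needs a matrix cell final_list[AA[y]][position] that does not exist.
def Pre_count_residues (seq : List String) (final_list : List (List Int)) : Prop :=
  ∀ s ∈ seq, ∀ p ∈ s.toList.zipIdx, ∀ r ∈ pyAA.get? p.1,
    r < final_list.length ∧ p.2 < (final_list.getD r []).length
instance (seq : List String) (final_list : List (List Int)) : Decidable (Pre_count_residues seq final_list) := by unfold Pre_count_residues; infer_instance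

def pvWitness_count_residues : List String × List (List Int) := (["A"], [[0]])

def Spec_count_residues (seq : List String) (final_list : List (List Int)) (out : List (List Int)) : Prop := out = count_residues_alt seq final_list
instance (seq : List String) (final_list : List (List Int)) (out : List (List Int)) : Decidable (Spec_count_residues seq final_list out) := by unfold Spec_count_residues; infer_instance

-- ===== CLAIM (what is proved, stated in full; the proofs are below) =====
def Claim_equal_count_residues : Prop := ∀ (seq : List String) (final_list : List (List Int)), Dom_count_residues seq final_list → Pre_count_residues seq final_list → Spec_count_residues seq final_list (count_residues seq final_list)

-- ===== LEMMAS AND PROOFS =====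

-- one increment, as a pair (row index, column index)
def inc (m : List (List Int)) (p : Nat × Nat) : List (List Int) :=
  m.modify p.1 (fun row => row.modify p.2 (· + 1))

def applyPairs (m : List (List Int)) (ps : List (Nat × Nat)) : List (List Int) :=
  ps.foldl inc m

-- the (at most one) increment character y at column c2 generates
def gPair (y : Char) (c2 : Nat) : List (Nat × Nat) :=
  match pyAA.get? y with
  | some r => [(r, c2)]
  | none => []

-- does column c of sequence s hit row r?
def hit (s : List Char) (r c : Nat) : Bool :=
  match s[c]? with
  | some y => pyAA.get? y == some r
  | none => false

def rowPairs (seq : List String) : List (Nat × Nat) :=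
  seq.flatMap (fun s => s.toList.zipIdx.flatMap (fun p => gPair p.1 p.2))

def colPairs (seq : List String) (width : Nat) : List (Nat × Nat) :=
  (List.range width).flatMap (fun c2 =>
    seq.flatMap (fun s =>
      match s.toList[c2]? with
      | some y => gPair y c2
      | none => []))

theorem modrow_comm (row : List Int) (a b : Nat) :
    (row.modify a (· + 1)).modify b (· + 1) = (row.modify b (· + 1)).modify a (· + 1) := by
  apply List.ext_getElem?
  intro j
  simp [List.getElem?_modify]
  rcases row[j]? with _ | v
  · rfl
  · simp; split_ifs <;> simp

theorem inc_comm (m : List (List Int)) (p q : Nat × Nat) :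
    inc (inc m p) q = inc (inc m q) p := by
  apply List.ext_getElem?
  intro j
  simp [inc, List.getElem?_modify]
  rcases m[j]? with _ | row
  · rfl
  · simp
    split_ifs with h1 h2 h2
    · subst h1; rw [modrow_comm]
    all_goals rfl

theorem incAA_eq_applyPairs (m : List (List Int)) (c2 : Nat) (y : Char) :
    incAA m c2 y = applyPairs m (gPair y c2) := by
  unfold incAA gPair
  cases pyAA.get? y <;> simp [applyPairs, inc]

theorem applyPairs_append (m : List (List Int)) (ps qs : List (Nat × Nat)) :
    applyPairs m (ps ++ qs) = applyPairs (applyPairs m ps) qs := by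
  simp [applyPairs, List.foldl_append]

theorem innerA_eq (cs : List Char) : ∀ (m : List (List Int)) (c0 : Nat),
    cs.foldl (fun (p : List (List Int) × Nat) y => (incAA p.1 p.2 y, p.2 + 1)) (m, c0)
      = (applyPairs m ((cs.zipIdx c0).flatMap (fun p => gPair p.1 p.2)), c0 + cs.length) := by
  induction cs with
  | nil => intro m c0; simp [applyPairs]
  | cons x cs ih =>
    intro m c0
    rw [List.foldl_cons]
    show cs.foldl _ (incAA m c0 x, c0 + 1) = _
    rw [ih]
    simp only [List.zipIdx_cons, List.flatMap_cons, applyPairs_append, incAA_eq_applyPairs,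
      List.length_cons]
    exact Prod.ext rfl (by omega)

theorem foldl_applyPairs {β : Type} (l : List β) (h : β → List (Nat × Nat)) (m : List (List Int)) :
    l.foldl (fun m x => applyPairs m (h x)) m = applyPairs m (l.flatMap h) := by
  induction l generalizing m with
  | nil => simp [applyPairs]
  | cons x l ih => simp [List.flatMap_cons, applyPairs_append, ih]

theorem outerA_eq (seq : List String) : ∀ (l : List String) (k : Nat) (m : List (List Int)),
    seq.drop k = l →
    (l.foldl
      (fun (st : List (List Int) × Nat) _x =>
        (((seq.getD st.2 "").toList.foldl
            (fun (p : List (List Int) × Nat) y => (incAA p.1 p.2 y, p.2 + 1))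
            (st.1, 0)).1,
         st.2 + 1))
      (m, k)).1
      = applyPairs m (l.flatMap (fun s => s.toList.zipIdx.flatMap (fun p => gPair p.1 p.2))) := by
  intro l
  induction l with
  | nil => intro k m _; simp [applyPairs]
  | cons x l ih =>
    intro k m hk
    rw [List.foldl_cons]
    have hget : seq.getD k "" = x := by
      have h1 : seq[k]? = some x := by
        rw [← List.head?_drop, hk]; rfl
      simp [List.getD, h1]
    have hdrop : seq.drop (k+1) = l := by
      rw [← List.tail_drop, hk]; rfl

    show (l.foldl _ ((((seq.getD k "").toList.foldl _ (m, 0)).1 : List (List Int)), k+1)).1 = _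
    rw [hget, innerA_eq, ih (k+1) _ hdrop, List.flatMap_cons, applyPairs_append]

theorem countA (seq : List String) (final_list : List (List Int)) :
    count_residues seq final_list = applyPairs final_list (rowPairs seq) := by
  unfold count_residues rowPairs
  exact outerA_eq seq seq 0 final_list rfl

theorem countB (seq : List String) (final_list : List (List Int)) :
    count_residues_alt seq final_list
      = applyPairs final_list
          (colPairs seq (seq.foldl (fun w s => if s.toList.length > w then s.toList.length else w) 0)) := by
  unfold count_residues_alt colPairs
  have hcell : ∀ (c2 : Nat),
      (fun (m : List (List Int)) (s : String) =>
        match s.toList[c2]? with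
        | some y => incAA m c2 y
        | none => m)
      = (fun m s => applyPairs m (match s.toList[c2]? with
        | some y => gPair y c2
        | none => [])) := by
    intro c2; funext m s
    cases s.toList[c2]? <;> simp [applyPairs, incAA_eq_applyPairs]
  have houter :
      (fun (m : List (List Int)) (c2 : Nat) =>
        seq.foldl (fun m s =>
          match s.toList[c2]? with
          | some y => incAA m c2 y
          | none => m) m)
      = (fun m c2 => applyPairs m (seq.flatMap (fun s =>
          match s.toList[c2]? with
          | some y => gPair y c2
          | none => []))) := by
    funext m c2
    rw [hcell c2, foldl_applyPairs]
  rw [houter, foldl_applyPairs]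

theorem count_pairsOf (cs : List Char) : ∀ (k r c : Nat),
    ((cs.zipIdx k).flatMap (fun p => gPair p.1 p.2)).count (r, c)
      = if k ≤ c ∧ hit cs r (c - k) then 1 else 0 := by
  induction cs with
  | nil => intro k r c; simp [hit]
  | cons x cs ih =>
    intro k r c
    rw [List.zipIdx_cons, List.flatMap_cons, List.count_append, ih]
    have hg : (gPair x k).count (r, c) = if k = c ∧ pyAA.get? x = some r then 1 else 0 := by
      unfold gPair
      cases h : pyAA.get? x with
      | none => simp
      | some v =>
        simp only [List.count_cons, List.count_nil, beq_iff_eq, Prod.mk.injEq]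
        by_cases hv : v = r <;> by_cases hk : k = c <;> simp [hv, hk]
    rw [hg]
    by_cases hk : k = c
    · subst hk
      have : ¬ (k + 1 ≤ k) := by omega
      simp [this, hit]
    · by_cases hlt : k < c
      · have h1 : k + 1 ≤ c := by omega
        have h2 : k ≤ c := by omega
        have h3 : c - k = (c - (k+1)) + 1 := by omega
        simp only [hk, false_and, if_false, h1, h2, true_and, h3]
        have : hit (x :: cs) r ((c - (k+1)) + 1) = hit cs r (c - (k+1)) := by
          simp [hit]
        rw [this]; omega
      · have h1 : ¬ (k + 1 ≤ c) := by omega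
        have h2 : ¬ (k ≤ c) := by omega
        simp [hk, h1, h2]

theorem count_rowPairs (seq : List String) (r c : Nat) :
    (rowPairs seq).count (r, c) = seq.countP (fun s => hit s.toList r c) := by
  unfold rowPairs
  induction seq with
  | nil => simp
  | cons s seq ih =>
    rw [List.flatMap_cons, List.count_append, ih, List.countP_cons, count_pairsOf]
    simp only [Nat.sub_zero, Nat.zero_le, true_and]
    by_cases h : hit s.toList r c <;> simp [h]; omega

theorem count_colOf (seq : List String) (c2 r c : Nat) :
    (seq.flatMap (fun s =>
      match s.toList[c2]? with
      | some y => gPair y c2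
      | none => [])).count (r, c)
      = if c2 = c then seq.countP (fun s => hit s.toList r c) else 0 := by
  induction seq with
  | nil => simp
  | cons s seq ih =>
    rw [List.flatMap_cons, List.count_append, ih, List.countP_cons]
    have hcell : (match s.toList[c2]? with
        | some y => gPair y c2
        | none => ([] : List (Nat × Nat))).count (r, c)
        = if c2 = c ∧ hit s.toList r c2 then 1 else 0 := by
      unfold hit gPair
      cases h : s.toList[c2]? with
      | none => simp
      | some y =>
        cases hy : pyAA.get? y with
        | none => simp [hy]
        | some v =>
          simp only [hy, List.count_cons, List.count_nil, beq_iff_eq, Prod.mk.injEq,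
            Option.some.injEq]
          by_cases hv : v = r <;> by_cases hk : c2 = c <;> simp [hv, hk]
    rw [hcell]
    by_cases hk : c2 = c
    · subst hk
      by_cases h : hit s.toList r c2 <;> simp [h]; omega
    · simp [hk]

theorem count_colPairs (seq : List String) (width r c : Nat) :
    (colPairs seq width).count (r, c)
      = if c < width then seq.countP (fun s => hit s.toList r c) else 0 := by
  unfold colPairs
  induction width with
  | zero => simp
  | succ w ih =>
    rw [List.range_succ, List.flatMap_append, List.count_append, ih]
    simp only [List.flatMap_cons, List.flatMap_nil, List.append_nil, count_colOf]
    by_cases h1 : c < w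
    · have h2 : c < w + 1 := by omega
      have h3 : ¬ (w = c) := by omega
      simp [h1, h2, h3]
    · by_cases h2 : w = c
      · subst h2; simp
      · have h3 : ¬ (c < w + 1) := by omega
        simp [h1, h2, h3]

theorem width_init_le (seq : List String) : ∀ (i : Nat),
    i ≤ seq.foldl (fun w s => if s.toList.length > w then s.toList.length else w) i := by
  induction seq with
  | nil => simp
  | cons z zs ih =>
    intro i
    rw [List.foldl_cons]
    refine le_trans ?_ (ih _)
    split <;> omega

theorem le_width (seq : List String) : ∀ (init : Nat) (s : String), s ∈ seq →
    s.toList.length ≤ seq.foldl (fun w s => if s.toList.length > w then s.toList.length else w) init := by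
  induction seq with
  | nil => intro _ _ h; simp at h
  | cons x seq ih =>
    intro init s hs
    rw [List.foldl_cons]
    rcases List.mem_cons.1 hs with h | h
    · subst h
      refine le_trans ?_ (width_init_le seq _)
      split <;> omega
    · exact ih _ s h

theorem hit_lt (s : List Char) (r c : Nat) (h : hit s r c) : c < s.length := by
  unfold hit at h
  cases hc : s[c]? with
  | none => rw [hc] at h; simp at h
  | some y => exact (List.getElem?_eq_some_iff.1 hc).1

theorem perm_row_col (seq : List String) :
    (rowPairs seq).Perm (colPairs seq (seq.foldl (fun w s => if s.toList.length > w then s.toList.length else w) 0)) := by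
  rw [List.perm_iff_count]
  rintro ⟨r, c⟩
  rw [count_rowPairs, count_colPairs]
  by_cases h : c < seq.foldl (fun w s => if s.toList.length > w then s.toList.length else w) 0
  · rw [if_pos h]
  · simp only [h, if_false]
    rw [List.countP_eq_zero]
    intro s hs
    by_contra hne
    have hh : hit s.toList r c = true := by
      revert hne; cases hit s.toList r c <;> simp
    exact h (lt_of_lt_of_le (hit_lt _ _ _ hh) (le_width seq 0 s hs))

-- ===== VERDICT (by name: the statement is the Claim_ definition above) =====
theorem count_residues_spec : Claim_equal_count_residues := by
  intro seq final_list _ _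
  unfold Spec_count_residues
  rw [countA, countB]
  exact @List.Perm.foldl_eq _ _ inc _ _ ⟨fun m p q => inc_comm m p q⟩ (perm_row_col seq) final_list
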